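-- pv_equiv track=rewrite | github.com/simirajpal/CS-CM124 | phasing.py | possible_haplotypes
-- ===== SOURCE A (Python) =====
-- def possible_haplotypes(haplotype):
-- 	final_haplotype = [[]]
-- 	for snp in haplotype:
-- 		if snp == '0' or snp == '1':
-- 			for pos in final_haplotype:
-- 				pos.append(snp)
-- 		elif snp == 'heterozygous':
-- 			final_haplotype2 = [[] for each in range(len(final_haplotype))]
-- 			for i in range(len(final_haplotype)):
-- 				for j in range(len(final_haplotype[i])):
-- 					final_haplotype2[i].append(final_haplotype[i][j])
-- 			for k in range(len(final_haplotype)):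
-- 				final_haplotype[k].append('0')
-- 				final_haplotype2[k].append('1')
-- 			final_haplotype = list(final_haplotype + final_haplotype2)
-- 	return final_haplotype
-- ===== SOURCE B (Python) =====
-- def possible_haplotypes(haplotype):
--     # One pass: fixed template with '?' placeholders + het positions; then
--     # enumerate assignments by counting k in [0, 2**h), bit j of k filling het j.
--     template = []
--     hets = []
--     for snp in haplotype:
--         if snp == '0' or snp == '1':
--             template.append(snp)
--         elif snp == 'heterozygous':
--             hets.append(len(template))
--             template.append('?')
--     result = []
--     for k in range(2 ** len(hets)):
--         row = template[:]
--         for j, i in enumerate(hets):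
--             row[i] = '01'[(k >> j) & 1]
--         result.append(row)
--     return result
-- ===== Notes on version B (the rewrite author's own statement) =====
-- stated objective: alternative
-- what changed: A repeatedly doubles the growing list of partial rows (copying every row at each heterozygous site); B makes one pass to build a fixed template plus the list of het positions, then enumerates the 2^h assignments directly by counting k and writing bit j of k into het position j.
import Mathlib
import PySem

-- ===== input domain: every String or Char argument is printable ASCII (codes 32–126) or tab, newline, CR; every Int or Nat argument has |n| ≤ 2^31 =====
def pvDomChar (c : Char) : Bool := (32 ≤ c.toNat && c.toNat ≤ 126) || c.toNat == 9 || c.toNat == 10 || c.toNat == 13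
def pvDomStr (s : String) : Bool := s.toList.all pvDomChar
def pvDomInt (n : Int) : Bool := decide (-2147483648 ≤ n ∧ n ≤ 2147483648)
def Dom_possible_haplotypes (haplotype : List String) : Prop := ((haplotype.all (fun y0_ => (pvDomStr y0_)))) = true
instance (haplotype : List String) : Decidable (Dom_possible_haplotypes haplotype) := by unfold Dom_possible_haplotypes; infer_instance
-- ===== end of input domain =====

-- B replaces A's list-doubling loop with a single template pass plus a direct
-- bit enumeration of the het assignments (objective: alternative algorithm, same output).

-- ===== PORT A =====
-- literal port of A: fold over the snps carrying the list of partial rows;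
-- the element-by-element copy loop of the het branch is the inner foldl
def possible_haplotypes (haplotype : List String) : List (List String) :=
  haplotype.foldl (fun fin snp =>
    if snp = "0" ∨ snp = "1" then
      fin.map (fun pos => pos ++ [snp])
    else if snp = "heterozygous" then
      let fin2 := fin.map (fun row => row.foldl (fun acc x => acc ++ [x]) [])
      (fin.map (fun row => row ++ ["0"])) ++ (fin2.map (fun row => row ++ ["1"]))
    else fin) [[]]

-- ===== PORT B =====
-- one pass: template of fixed snps with "?" placeholders, plus het positions
def phScan (haplotype : List String) : List String × List Nat :=
  haplotype.foldl (fun th snp =>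
    if snp = "0" ∨ snp = "1" then (th.1 ++ [snp], th.2)
    else if snp = "heterozygous" then (th.1 ++ ["?"], th.2 ++ [th.1.length])
    else th) ([], [])

-- row for counter k: het number j receives bit j of k ('01'[(k >> j) & 1])
def phFill (templ : List String) (hets : List Nat) (k : Nat) : List String :=
  hets.zipIdx.foldl (fun row ij =>
    row.set ij.1 (if (k >>> ij.2) % 2 = 1 then "1" else "0")) templ

def possible_haplotypes_alt (haplotype : List String) : List (List String) :=
  (List.range (2 ^ (phScan haplotype).2.length)).map
    (phFill (phScan haplotype).1 (phScan haplotype).2)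

-- ===== PRECONDITION & SPEC =====
def Spec_possible_haplotypes (haplotype : List String) (out : List (List String)) : Prop := out = possible_haplotypes_alt haplotype
instance (haplotype : List String) (out : List (List String)) : Decidable (Spec_possible_haplotypes haplotype out) := by unfold Spec_possible_haplotypes; infer_instance

-- ===== CLAIM (what is proved, stated in full; the proofs are below) =====
def Claim_equal_possible_haplotypes : Prop := ∀ (haplotype : List String), Dom_possible_haplotypes haplotype → Spec_possible_haplotypes haplotype (possible_haplotypes haplotype)

-- ===== LEMMAS AND PROOFS =====

-- the copy loop of A's het branch copies the row
theorem ph_copy_foldl (l acc : List String) :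
    l.foldl (fun a x => a ++ [x]) acc = acc ++ l := by
  induction l generalizing acc with
  | nil => simp
  | cons x xs ih => simp [List.foldl, ih]

-- every het position recorded by the scan points inside the template
theorem phScan_good (l : List String) : ∀ i ∈ (phScan l).2, i < (phScan l).1.length := by
  induction l using List.reverseRecOn with
  | nil => simp [phScan]
  | append_singleton l s ih =>
    simp only [phScan, List.foldl_append, List.foldl_cons, List.foldl_nil] at *
    split_ifs with h1 h2
    · intro i hi
      simpa using Nat.lt_succ_of_lt (ih i hi)
    · intro i hi
      simp only [List.mem_append, List.mem_singleton] at hi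
      rcases hi with hi | hi
      · simpa using Nat.lt_succ_of_lt (ih i hi)
      · simp [hi]
    · exact ih

-- a set-fold preserves length
theorem ph_foldl_set_length (ps : List (Nat × Nat)) (f : Nat → String) (t : List String) :
    (ps.foldl (fun row ij => row.set ij.1 (f ij.2)) t).length = t.length := by
  induction ps generalizing t with
  | nil => rfl
  | cons p ps ih => simp [List.foldl, ih]

-- a set-fold that only touches positions inside t commutes with appending u
theorem ph_foldl_set_append (ps : List (Nat × Nat)) (f : Nat → String) (t u : List String)
    (h : ∀ p ∈ ps, p.1 < t.length) :
    (ps.foldl (fun row ij => row.set ij.1 (f ij.2)) (t ++ u)) =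
    (ps.foldl (fun row ij => row.set ij.1 (f ij.2)) t) ++ u := by
  induction ps generalizing t with
  | nil => rfl
  | cons p ps ih =>
    simp only [List.foldl_cons]
    rw [List.set_append_left _ _ (h p (by simp))]
    exact ih _ (by intro q hq; simpa using h q (by simp [hq]))

-- a set-fold only depends on the values written
theorem ph_foldl_set_congr (ps : List (Nat × Nat)) (f g : Nat → String) (t : List String)
    (h : ∀ p ∈ ps, f p.2 = g p.2) :
    (ps.foldl (fun row ij => row.set ij.1 (f ij.2)) t) =
    (ps.foldl (fun row ij => row.set ij.1 (g ij.2)) t) := by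
  induction ps generalizing t with
  | nil => rfl
  | cons p ps ih =>
    simp only [List.foldl_cons, h p (by simp)]
    exact ih _ (by intro q hq; exact h q (by simp [hq]))

-- bit j of k' + 2^m agrees with bit j of k' for j < m
theorem ph_bit_low (k' m j : Nat) (hj : j < m) :
    ((k' + 2 ^ m) >>> j) % 2 = (k' >>> j) % 2 := by
  rw [Nat.shiftRight_eq_div_pow, Nat.shiftRight_eq_div_pow]
  have h1 : 2 ^ m = 2 ^ (m - j) * 2 ^ j := by
    rw [← pow_add]; congr 1; omega
  rw [h1, Nat.add_mul_div_right _ _ (Nat.two_pow_pos j)]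
  have h2 : 2 ^ (m - j) = 2 * 2 ^ (m - j - 1) := by
    rw [← pow_succ']; congr 1; omega
  omega

-- bit m of k' + 2^m is 1 and bit m of k < 2^m is 0
theorem ph_bit_high_one (k' m : Nat) (hk : k' < 2 ^ m) :
    ((k' + 2 ^ m) >>> m) % 2 = 1 := by
  rw [Nat.shiftRight_eq_div_pow]
  have : (k' + 2 ^ m) / 2 ^ m = 1 := by
    rw [Nat.add_div_right _ (Nat.two_pow_pos m), Nat.div_eq_of_lt hk]
  simp [this]

theorem ph_bit_high_zero (k m : Nat) (hk : k < 2 ^ m) : (k >>> m) % 2 = 0 := by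
  rw [Nat.shiftRight_eq_div_pow, Nat.div_eq_of_lt hk]

-- phFill after appending a fixed snp to the template
theorem phFill_append_fixed (t : List String) (h : List Nat) (s : String) (k : Nat)
    (hg : ∀ i ∈ h, i < t.length) :
    phFill (t ++ [s]) h k = phFill t h k ++ [s] := by
  unfold phFill
  exact ph_foldl_set_append h.zipIdx (fun j => if k >>> j % 2 = 1 then "1" else "0") t [s] (by
    intro p hp
    exact hg p.1 (List.fst_mem_of_mem_zipIdx (k := 0) hp))

-- phFill after appending a new het at the end of the template
theorem phFill_append_het (t : List String) (h : List Nat) (k : Nat)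
    (hg : ∀ i ∈ h, i < t.length) :
    phFill (t ++ ["?"]) (h ++ [t.length]) k =
      phFill t h k ++ [if (k >>> h.length) % 2 = 1 then "1" else "0"] := by
  unfold phFill
  rw [List.zipIdx_append, List.foldl_append]
  simp only [List.zipIdx, List.foldl_cons, List.foldl_nil]
  rw [ph_foldl_set_append h.zipIdx (fun j => if k >>> j % 2 = 1 then "1" else "0") t ["?"] (by
    intro p hp
    exact hg p.1 (List.fst_mem_of_mem_zipIdx (k := 0) hp))]
  have hl : (List.foldl (fun row ij => row.set ij.1
      (if k >>> ij.2 % 2 = 1 then "1" else "0")) t h.zipIdx).length = t.length :=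
    ph_foldl_set_length h.zipIdx (fun j => if k >>> j % 2 = 1 then "1" else "0") t
  rw [List.set_append_right _ _ (by omega)]
  simp [hl]

-- phFill for the second half of the counter range: low bits unchanged
theorem phFill_high (t : List String) (h : List Nat) (k' : Nat) :
    phFill t h (k' + 2 ^ h.length) = phFill t h k' := by
  unfold phFill
  refine ph_foldl_set_congr h.zipIdx
    (fun j => if (k' + 2 ^ h.length) >>> j % 2 = 1 then "1" else "0")
    (fun j => if k' >>> j % 2 = 1 then "1" else "0") t ?_
  intro p hp
  have hj : p.2 < h.length := by
    rcases List.mem_zipIdx hp with ⟨h1, _⟩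
    omega
  dsimp only
  rw [ph_bit_low _ _ _ hj]

-- one step of A's fold, applied to a snoc
theorem possible_haplotypes_append (l : List String) (s : String) :
    possible_haplotypes (l ++ [s]) =
      (if s = "0" ∨ s = "1" then
        (possible_haplotypes l).map (fun pos => pos ++ [s])
      else if s = "heterozygous" then
        ((possible_haplotypes l).map (fun row => row ++ ["0"])) ++
        (((possible_haplotypes l).map (fun row => row.foldl (fun acc x => acc ++ [x]) [])).map
          (fun row => row ++ ["1"]))
      else possible_haplotypes l) := by
  simp [possible_haplotypes, List.foldl_append]

theorem phScan_append (l : List String) (s : String) :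
    phScan (l ++ [s]) =
      (if s = "0" ∨ s = "1" then ((phScan l).1 ++ [s], (phScan l).2)
      else if s = "heterozygous" then ((phScan l).1 ++ ["?"], (phScan l).2 ++ [(phScan l).1.length])
      else phScan l) := by
  simp [phScan, List.foldl_append]

theorem ph_main (l : List String) : possible_haplotypes l = possible_haplotypes_alt l := by
  induction l using List.reverseRecOn with
  | nil => decide
  | append_singleton l s ih =>
    have hg := phScan_good l
    rw [possible_haplotypes_append]
    unfold possible_haplotypes_alt
    rw [phScan_append]
    split_ifs with h1 h2
    · -- fixed snp
      simp only [ih, possible_haplotypes_alt, List.map_map]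
      refine List.map_congr_left ?_
      intro k _
      simp [Function.comp, phFill_append_fixed _ _ _ _ hg]
    · -- heterozygous
      simp only [ih, possible_haplotypes_alt, List.map_map]
      set t := (phScan l).1
      set h := (phScan l).2
      have hsplit : (2 : Nat) ^ (h ++ [t.length]).length = 2 ^ h.length + 2 ^ h.length := by
        simp [pow_succ]; ring
      rw [hsplit, List.range_add, List.map_append, List.map_map]
      congr 1
      · refine List.map_congr_left ?_
        intro k hk
        have hk' : k < 2 ^ h.length := List.mem_range.mp hk
        simp only [Function.comp]
        rw [phFill_append_het _ _ _ hg, ph_bit_high_zero _ _ hk']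
        simp
      · refine List.map_congr_left ?_
        intro k hk
        have hk' : k < 2 ^ h.length := List.mem_range.mp hk
        simp only [Function.comp]
        rw [ph_copy_foldl, Nat.add_comm (2 ^ h.length) k, phFill_append_het _ _ _ hg,
          ph_bit_high_one _ _ hk', phFill_high]
        simp
    · exact ih

-- ===== VERDICT (by name: the statement is the Claim_ definition above) =====
theorem possible_haplotypes_spec : Claim_equal_possible_haplotypes := by
  intro l _
  unfold Spec_possible_haplotypes
  exact ph_main l
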